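-- pv_equiv track=rewrite | github.com/yiyan023/Data-Structures | GCA/Array Mutation.py | solution
-- ===== SOURCE A (Python) =====
-- def solution(n: int, a: list) -> list:
--     b = []
--     for i in range(n):
--         left = a[i - 1] if i - 1 >= 0 else 0
--         mid = a[i]
--         right = a[i + 1] if i + 1 < n else 0
--         b.append(left + mid + right)
--     return b
-- ===== SOURCE B (Python) =====
-- def solution(n: int, a: list) -> list:
--     b = [0] * n
--     for j in range(n):
--         x = a[j]
--         b[j] += x
--         if j - 1 >= 0:
--             b[j - 1] += x
--         if j + 1 < n:
--             b[j + 1] += x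
--     return b
-- ===== Notes on version B (the rewrite author's own statement) =====
-- stated objective: alternative
-- what changed: Replaces A's gather (each output element reads its three neighbours with boundary guards) by a scatter over a pre-allocated zero list (each input element adds itself into its own, left and right output slots).
import Mathlib
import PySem

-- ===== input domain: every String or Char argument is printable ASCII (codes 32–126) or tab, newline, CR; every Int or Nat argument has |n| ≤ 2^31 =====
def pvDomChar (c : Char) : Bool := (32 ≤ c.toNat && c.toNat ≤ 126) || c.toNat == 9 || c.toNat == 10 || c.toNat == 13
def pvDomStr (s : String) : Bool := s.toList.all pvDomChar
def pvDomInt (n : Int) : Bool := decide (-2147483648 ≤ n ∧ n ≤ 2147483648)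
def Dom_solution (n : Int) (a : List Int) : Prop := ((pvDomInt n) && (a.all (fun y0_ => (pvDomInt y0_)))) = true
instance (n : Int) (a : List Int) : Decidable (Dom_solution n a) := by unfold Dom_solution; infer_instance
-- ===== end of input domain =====

-- B replaces A's gather (each output reads its three neighbours) by a scatter over a
-- pre-allocated zero list (each input adds itself into its three output slots); same cost,
-- genuinely different traversal. Equality of return values proved on Pre_ (no IndexError).

-- ===== PORT A =====
def solution (n : Int) (a : List Int) : List Int :=
  (PySem.List.pyRange 0 n 1).foldl (fun b i =>
    let left := if i - 1 ≥ 0 then PySem.List.pyGetD a (i - 1) 0 else 0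
    let mid := PySem.List.pyGetD a i 0
    let right := if i + 1 < n then PySem.List.pyGetD a (i + 1) 0 else 0
    b ++ [left + mid + right]) []

-- ===== PORT B =====
def solution_alt (n : Int) (a : List Int) : List Int :=
  (PySem.List.pyRange 0 n 1).foldl (fun b j =>
    let x := PySem.List.pyGetD a j 0
    let b := PySem.List.pySetD b j (PySem.List.pyGetD b j 0 + x)
    let b := if j - 1 ≥ 0 then PySem.List.pySetD b (j - 1) (PySem.List.pyGetD b (j - 1) 0 + x) else b
    if j + 1 < n then PySem.List.pySetD b (j + 1) (PySem.List.pyGetD b (j + 1) 0 + x) else b)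
    (List.replicate n.toNat 0)

-- ===== PRECONDITION & SPEC =====
-- Pre_: the Python A raises IndexError (at a[i]) as soon as n exceeds len(a); exactly those inputs are excluded.
def Pre_solution (n : Int) (a : List Int) : Prop := n ≤ (a.length : Int)
instance (n : Int) (a : List Int) : Decidable (Pre_solution n a) := by unfold Pre_solution; infer_instance
def pvWitness_solution : Int × List Int := (3, [1, 2, 3])

def Spec_solution (n : Int) (a : List Int) (out : List Int) : Prop := out = solution_alt n a
instance (n : Int) (a : List Int) (out : List Int) : Decidable (Spec_solution n a out) := by unfold Spec_solution; infer_instance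

-- ===== CLAIM (what is proved, stated in full; the proofs are below) =====
def Claim_equal_solution : Prop := ∀ (n : Int) (a : List Int), Dom_solution n a → Pre_solution n a → Spec_solution n a (solution n a)

-- ===== LEMMAS AND PROOFS =====

-- a[i] with default 0 (kept opaque during index arithmetic; inside Pre_ the default is never hit)
def pvA (a : List Int) (i : Int) : Int := PySem.List.pyGetD a i 0

-- B's loop body, named for the proofs (definitionally the lambda in solution_alt)
def pvStep (a : List Int) (n : Int) : List Int → Int → List Int := fun b j =>
  let x := PySem.List.pyGetD a j 0
  let b := PySem.List.pySetD b j (PySem.List.pyGetD b j 0 + x)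
  let b := if j - 1 ≥ 0 then PySem.List.pySetD b (j - 1) (PySem.List.pyGetD b (j - 1) 0 + x) else b
  if j + 1 < n then PySem.List.pySetD b (j + 1) (PySem.List.pyGetD b (j + 1) 0 + x) else b

-- value of output slot i after the first k scatter iterations of B
def pvG (a : List Int) (n : Int) (k i : ℕ) : Int :=
  (if 1 ≤ i ∧ i ≤ k then pvA a ((i : Int) - 1) else 0) +
  (if i < k then pvA a (i : Int) else 0) +
  (if i + 1 < k then pvA a ((i : Int) + 1) else 0)

lemma set_map_range (f : ℕ → Int) (n p : ℕ) (v : Int) :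
    ((List.range n).map f).set p v = (List.range n).map (fun i => if i = p then v else f i) := by
  apply List.ext_getElem (by simp)
  intro i h1 h2
  simp only [List.getElem_set, List.getElem_map, List.getElem_range]
  split_ifs <;> first | rfl | omega

lemma pyGetD_map_range' (f : ℕ → Int) (n i : ℕ) (hi : i < n) :
    PySem.List.pyGetD ((List.range n).map f) (↑i) 0 = f i := by
  rw [PySem.List.pyGetD_natCast, PySem.List.getD_map_range _ _ _ _ hi]

lemma pvStep_eq (a : List Int) (n : Int) (k : ℕ) (hk : k < n.toNat) :
    pvStep a n ((List.range n.toNat).map (pvG a n k)) (k : Int)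
      = (List.range n.toNat).map (pvG a n (k + 1)) := by
  unfold pvStep
  simp only []
  rcases k with _ | m
  · -- k = 0 : the left write is skipped
    rw [pyGetD_map_range' _ _ _ hk]
    rw [if_neg (show ¬ (((0 : ℕ) : Int) - 1 ≥ 0) by omega)]
    rw [show ((0 : ℕ) : Int) + 1 = ((1 : ℕ) : Int) by norm_num]
    by_cases hg : ((1 : ℕ) : Int) < n
    · rw [if_pos hg]
      rw [PySem.List.pyGetD_pySetD_natCast _ 0 1 _ 0 (by simpa using hk)]
      rw [if_neg (by omega), pyGetD_map_range' _ _ _ (by omega)]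
      simp only [PySem.List.pySetD_natCast, set_map_range]
      apply List.map_congr_left
      intro i hi
      simp only [List.mem_range] at hi
      unfold pvG pvA
      split_ifs <;> first | omega | (subst_vars; push_cast; ring_nf; try omega)
    · rw [if_neg hg]
      simp only [PySem.List.pySetD_natCast, set_map_range]
      apply List.map_congr_left
      intro i hi
      simp only [List.mem_range] at hi
      unfold pvG pvA
      split_ifs <;> first | omega | (subst_vars; push_cast; ring_nf; try omega)
  · -- k = m+1 : the left write happens, the right one iff m+2 < n
    have e1 : ((m + 1 : ℕ) : Int) - 1 = ((m : ℕ) : Int) := by push_cast; ring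
    have e2 : ((m + 1 : ℕ) : Int) + 1 = ((m + 2 : ℕ) : Int) := by push_cast; ring
    rw [e1, e2]
    rw [pyGetD_map_range' _ _ _ hk]
    by_cases hg : ((m + 2 : ℕ) : Int) < n
    · rw [if_pos hg]
      rw [if_pos (show ((m : ℕ) : Int) ≥ 0 by positivity)]
      rw [PySem.List.pyGetD_pySetD_natCast _ (m + 1) m _ 0 (by simpa using hk)]
      rw [if_neg (show ¬ (m = m + 1) by omega)]
      rw [pyGetD_map_range' _ _ _ (show m < n.toNat by omega)]
      rw [PySem.List.pyGetD_pySetD_natCast _ m (m + 2) _ 0 (by simp; omega)]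
      rw [if_neg (show ¬ (m + 2 = m) by omega)]
      rw [PySem.List.pyGetD_pySetD_natCast _ (m + 1) (m + 2) _ 0 (by simpa using hk)]
      rw [if_neg (show ¬ (m + 2 = m + 1) by omega)]
      rw [pyGetD_map_range' _ _ _ (show m + 2 < n.toNat by omega)]
      simp only [PySem.List.pySetD_natCast, set_map_range]
      apply List.map_congr_left
      intro i hi
      simp only [List.mem_range] at hi
      unfold pvG pvA
      split_ifs <;> first | omega | (subst_vars; push_cast; ring_nf; try omega)
    · rw [if_neg hg]
      rw [if_pos (show ((m : ℕ) : Int) ≥ 0 by positivity)]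
      rw [PySem.List.pyGetD_pySetD_natCast _ (m + 1) m _ 0 (by simpa using hk)]
      rw [if_neg (show ¬ (m = m + 1) by omega)]
      rw [pyGetD_map_range' _ _ _ (show m < n.toNat by omega)]
      simp only [PySem.List.pySetD_natCast, set_map_range]
      apply List.map_congr_left
      intro i hi
      simp only [List.mem_range] at hi
      unfold pvG pvA
      split_ifs <;> first | omega | (subst_vars; push_cast; ring_nf; try omega)

lemma pvB_inv (a : List Int) (n : Int) (k : ℕ) (hk : k ≤ n.toNat) :
    (PySem.List.pyRange 0 (k : Int) 1).foldl (pvStep a n) (List.replicate n.toNat 0)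
      = (List.range n.toNat).map (pvG a n k) := by
  induction k with
  | zero =>
      rw [show ((0 : ℕ) : Int) = 0 by norm_num, PySem.List.pyRange_one_eq_nil (le_refl 0)]
      simp only [List.foldl_nil]
      have h : (List.range n.toNat).map (pvG a n 0) = (List.range n.toNat).map (fun _ => (0 : Int)) :=
        List.map_congr_left (fun i _ => by unfold pvG; rw [if_neg (by omega), if_neg (by omega), if_neg (by omega)]; ring)
      rw [h, List.map_const', List.length_range]
  | succ k ih =>
      rw [show ((k + 1 : ℕ) : Int) = (k : Int) + 1 by push_cast; ring]
      rw [PySem.List.pyRange_one_succ_right (Int.natCast_nonneg k), List.foldl_append,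
          ih (by omega), List.foldl_cons, List.foldl_nil]
      exact pvStep_eq a n k (by omega)

lemma pvB_eq (n : Int) (a : List Int) :
    solution_alt n a = (List.range n.toNat).map (pvG a n n.toNat) := by
  have h : solution_alt n a
      = (PySem.List.pyRange 0 n 1).foldl (pvStep a n) (List.replicate n.toNat 0) := rfl
  rw [h]
  by_cases hn : n ≤ 0
  · rw [PySem.List.pyRange_one_eq_nil hn, List.foldl_nil, show n.toNat = 0 by omega]
    simp
  · rw [show PySem.List.pyRange 0 n 1 = PySem.List.pyRange 0 ((n.toNat : Int)) 1 by
        rw [show ((n.toNat : Int)) = n by omega]]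
    exact pvB_inv a n n.toNat (le_refl _)

lemma pvA_eq (n : Int) (a : List Int) :
    solution n a = (List.range n.toNat).map (fun (k : ℕ) =>
      (if (k : Int) - 1 ≥ 0 then pvA a ((k : Int) - 1) else 0) + pvA a (k : Int) +
      (if (k : Int) + 1 < n then pvA a ((k : Int) + 1) else 0)) := by
  unfold solution pvA
  rw [PySem.List.foldl_append_singleton_eq_map, PySem.List.pyRange_one]
  simp only [List.nil_append, List.map_map, Int.sub_zero]
  exact List.map_congr_left (fun i _ => by simp)

-- ===== VERDICT (by name: the statement is the Claim_ definition above) =====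
theorem solution_spec : Claim_equal_solution := by
  intro n a _ _
  unfold Spec_solution
  rw [pvA_eq, pvB_eq]
  apply List.map_congr_left
  intro k hk
  simp only [List.mem_range] at hk
  unfold pvG
  split_ifs <;> first | ring1 | omega
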